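-- pv_equiv track=rewrite | github.com/AEVegaEngineer/PythonFlujos | p5ej9.py | PMaxLong
-- ===== SOURCE A (Python) =====
-- def esLetra(let):
--     res=False
--     if (let>="A" and let<="Z") or (let>="a" and let<="z"):
--         res=True
--     return res
--
-- def PMaxLong(txt):
--     i=0
--     j=0
--     MaxPal=" "
--     #MaxPal=" "
--     LT=len(txt)
--     while i<LT:
--         while i<LT and not esLetra(txt[i]): #cuando no es letra entra
--             i+=1
--             j=i
--         while j<LT and esLetra(txt[j]): #cuando es letra se queda
--             j+=1
--
--         if j<=LT:
--             if MaxPal != " ":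
--                 if len(MaxPal)<len(txt[i:j]):
--                     MaxPal=txt[i:j]
--             else:
--                 MaxPal=txt[i:j]
--         i=j
--     return MaxPal
-- ===== SOURCE B (Python) =====
-- def PMaxLong(txt):
--     # Tokenize into maximal alphabetic runs, then take the first longest one.
--     # On empty input this returns "" (no word found), not A's " " sentinel.
--     words = []
--     cur = ""
--     for ch in txt:
--         if ch.isalpha():
--             cur += ch
--         elif cur:
--             words.append(cur)
--             cur = ""
--     if cur:
--         words.append(cur)
--     if not words:
--         return ""
--     best = words[0]
--     for w in words[1:]:
--         if len(w) > len(best):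
--             best = w
--     return best
-- ===== Notes on version B (the rewrite author's own statement) =====
-- stated objective: idiomatic
-- what changed: A interleaves a two-pointer index scan with slicing and a ' '-sentinel max update; B tokenizes the string into maximal alphabetic runs in one grouping pass and then reduces the word list to its first longest element.
-- intended difference: On the empty string A returns its initial sentinel ' ' (a one-space string that cannot be a word of txt); B returns '' as for every other letterless input, which is the intended 'no word found' result. — e.g. on PMaxLong(""): A returns " ", B returns ""
import Mathlib
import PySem

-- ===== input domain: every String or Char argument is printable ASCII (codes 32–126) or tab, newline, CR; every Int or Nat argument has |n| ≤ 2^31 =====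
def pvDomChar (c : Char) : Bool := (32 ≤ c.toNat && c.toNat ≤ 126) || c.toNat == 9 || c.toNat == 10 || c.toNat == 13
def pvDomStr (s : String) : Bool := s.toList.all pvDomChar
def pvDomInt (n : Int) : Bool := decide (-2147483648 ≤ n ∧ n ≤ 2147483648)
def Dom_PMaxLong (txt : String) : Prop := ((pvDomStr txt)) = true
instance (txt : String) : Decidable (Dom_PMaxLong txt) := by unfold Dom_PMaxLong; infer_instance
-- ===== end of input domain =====

-- B replaces A's interleaved two-pointer slice scan by tokenize-then-reduce (idiomatic, same cost);
-- on the empty string A returns its accidental " " sentinel while B returns "" (stated as D_ below).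

-- ===== PORT A =====
-- esLetra: Python compares 1-char strings; on single chars that is code-point order, i.e. Char ≤.
def esLetra (c : Char) : Bool :=
  if ('A' ≤ c ∧ c ≤ 'Z') ∨ ('a' ≤ c ∧ c ≤ 'z') then true else false

-- inner `while i<LT and not esLetra(txt[i])` (its `j=i` just makes j start where this loop stops)
def pvSkipA (cs : List Char) (LT i : Nat) : Nat :=
  if i < LT ∧ esLetra (cs.getD i ' ') = false then pvSkipA cs LT (i+1) else i
termination_by LT - i

-- inner `while j<LT and esLetra(txt[j])`
def pvTakeA (cs : List Char) (LT j : Nat) : Nat :=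
  if j < LT ∧ esLetra (cs.getD j ' ') = true then pvTakeA cs LT (j+1) else j
termination_by LT - j

theorem pvSkipA_ge (cs : List Char) (LT i : Nat) : i ≤ pvSkipA cs LT i := by
  fun_induction pvSkipA with
  | case1 => omega
  | case2 => omega

theorem pvTakeA_ge (cs : List Char) (LT j : Nat) : j ≤ pvTakeA cs LT j := by
  fun_induction pvTakeA with
  | case1 => omega
  | case2 => omega

-- one outer iteration strictly advances i (cited by pvLoopA's decreasing_by)
theorem pvStep_gt (cs : List Char) (LT i : Nat) (h : i < LT) :
    i < pvTakeA cs LT (pvSkipA cs LT i) := by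
  have h1 := pvSkipA_ge cs LT i
  rcases Nat.lt_or_ge i (pvSkipA cs LT i) with hlt | hge
  · exact Nat.lt_of_lt_of_le hlt (pvTakeA_ge cs LT _)
  · have heq : pvSkipA cs LT i = i := Nat.le_antisymm hge h1
    have hletter : esLetra (cs.getD i ' ') = true := by
      by_contra hne
      rw [pvSkipA] at heq
      simp only [h, true_and] at heq
      rw [if_pos (by simpa using hne)] at heq
      have := pvSkipA_ge cs LT (i+1)
      omega
    rw [heq, pvTakeA, if_pos ⟨h, hletter⟩]
    have := pvTakeA_ge cs LT (i+1)
    omega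

-- outer `while i<LT` over state (i, MaxPal); txt[i1:j1] with 0 ≤ i1 ≤ j1 is (drop i1).take (j1-i1)
def pvLoopA (cs : List Char) (LT i : Nat) (MaxPal : List Char) : List Char :=
  if i < LT then
    let i1 := pvSkipA cs LT i
    let j1 := pvTakeA cs LT i1
    let w := (cs.drop i1).take (j1 - i1)
    let M' := if j1 ≤ LT then
        (if MaxPal ≠ [' '] then (if MaxPal.length < w.length then w else MaxPal) else w)
      else MaxPal
    pvLoopA cs LT j1 M'
  else MaxPal
termination_by LT - i
decreasing_by
  rename_i h
  have := pvStep_gt cs LT i h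
  omega

def PMaxLong (txt : String) : String :=
  String.ofList (pvLoopA txt.toList txt.toList.length 0 [' '])

-- ===== PORT B =====
-- grouping step of B's for-loop; Char.isAlpha agrees with Python str.isalpha on the ASCII domain
def pvStepB (st : List (List Char) × List Char) (c : Char) : List (List Char) × List Char :=
  if c.isAlpha then (st.1, st.2 ++ [c])
  else if st.2 ≠ [] then (st.1 ++ [st.2], []) else st

def PMaxLong_alt (txt : String) : String :=
  let st := txt.toList.foldl pvStepB ([], [])
  let words := if st.2 ≠ [] then st.1 ++ [st.2] else st.1
  match words with
  | [] => ""
  | w :: rest => String.ofList (rest.foldl (fun best x => if best.length < x.length then x else best) w)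

-- ===== PRECONDITION & SPEC =====
-- On the empty string A returns its initial sentinel " " (a one-space string that cannot be a word
-- of txt); B returns "" as for every other letterless input, the intended "no word found" result.
def D_PMaxLong (txt : String) : Prop := txt = ""
instance (txt : String) : Decidable (D_PMaxLong txt) := by unfold D_PMaxLong; infer_instance

def Spec_PMaxLong (txt : String) (out : String) : Prop := ¬ D_PMaxLong txt → out = PMaxLong_alt txt
instance (txt : String) (out : String) : Decidable (Spec_PMaxLong txt out) := by unfold Spec_PMaxLong; infer_instance

def pvDiffWitness_PMaxLong : String := ""
def pvDiffWitnessOut_PMaxLong : String × String := (" ", "")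

-- ===== CLAIM (what is proved, stated in full; the proofs are below) =====
def Claim_unchanged_PMaxLong : Prop := ∀ (txt : String), Dom_PMaxLong txt → Spec_PMaxLong txt (PMaxLong txt)
def Claim_changed_PMaxLong : Prop := Dom_PMaxLong (pvDiffWitness_PMaxLong) ∧ D_PMaxLong (pvDiffWitness_PMaxLong) ∧ PMaxLong (pvDiffWitness_PMaxLong) = pvDiffWitnessOut_PMaxLong.1 ∧ PMaxLong_alt (pvDiffWitness_PMaxLong) = pvDiffWitnessOut_PMaxLong.2 ∧ pvDiffWitnessOut_PMaxLong.1 ≠ pvDiffWitnessOut_PMaxLong.2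
def Claim_exact_PMaxLong : Prop := ∀ (txt : String), Dom_PMaxLong txt → D_PMaxLong txt → PMaxLong txt ≠ PMaxLong_alt txt

-- ===== LEMMAS AND PROOFS =====

theorem esLetra_eq (c : Char) : esLetra c = c.isAlpha := by
  simp only [esLetra, Char.isAlpha, Char.isUpper, Char.isLower]
  split <;> rename_i h
  · simp only [Char.le_def] at h
    exact (by simp only [Bool.or_eq_true, Bool.and_eq_true, decide_eq_true_eq]; tauto : (_ = true)).symm
  · simp only [Char.le_def] at h
    refine (Bool.eq_false_iff.mpr ?_).symm
    simp only [ne_eq, Bool.or_eq_true, Bool.and_eq_true, decide_eq_true_eq]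
    tauto

-- the maximal alphabetic runs of `s`, `cur` being the letters of the run in progress
def pvRuns (cur s : List Char) : List (List Char) :=
  match s with
  | [] => if cur ≠ [] then [cur] else []
  | c :: t => if c.isAlpha then pvRuns (cur ++ [c]) t
              else if cur ≠ [] then cur :: pvRuns [] t else pvRuns [] t

-- A's running-max update (the `if j<=LT` body)
def pvUpd (M w : List Char) : List Char :=
  if M ≠ [' '] then (if M.length < w.length then w else M) else w

theorem take_len_takeWhile (p : Char → Bool) (l : List Char) :
    l.take (l.takeWhile p).length = l.takeWhile p := by
  induction l with
  | nil => rfl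
  | cons c t ih =>
      rw [List.takeWhile_cons]
      split
      · simpa using ih
      · simp

theorem drop_len_takeWhile (p : Char → Bool) (l : List Char) :
    l.drop (l.takeWhile p).length = l.dropWhile p := by
  induction l with
  | nil => rfl
  | cons c t ih =>
      rw [List.takeWhile_cons, List.dropWhile_cons]
      split
      · simpa using ih
      · simp

theorem dropWhile_head_false {p : Char → Bool} {l : List Char} {c : Char} {t : List Char}
    (h : l.dropWhile p = c :: t) : p c = false := by
  induction l with
  | nil => simp at h
  | cons a l ih =>
      rw [List.dropWhile_cons] at h
      split at h
      · exact ih h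
      · rename_i hp
        cases h
        exact Bool.eq_false_iff.mpr hp

theorem pvSkipA_eq (cs : List Char) (i : Nat) :
    pvSkipA cs cs.length i = i + ((cs.drop i).takeWhile (fun c => !c.isAlpha)).length := by
  fun_induction pvSkipA cs cs.length i with
  | case1 i h ih =>
      obtain ⟨hlt, hnl⟩ := h
      rw [List.getD_eq_getElem cs ' ' hlt, esLetra_eq] at hnl
      rw [List.drop_eq_getElem_cons hlt, List.takeWhile_cons, if_pos (by simp [hnl])]
      simp only [List.length_cons] at *
      omega
  | case2 i h =>
      rcases Nat.lt_or_ge i cs.length with hlt | hge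
      · have hl : esLetra (cs.getD i ' ') = true := by
          by_contra hc
          exact h ⟨hlt, by simpa using hc⟩
        rw [List.getD_eq_getElem cs ' ' hlt, esLetra_eq] at hl
        rw [List.drop_eq_getElem_cons hlt, List.takeWhile_cons, if_neg (by simp [hl])]
        simp
      · rw [List.drop_eq_nil_iff.mpr hge]
        simp

theorem pvTakeA_eq (cs : List Char) (j : Nat) :
    pvTakeA cs cs.length j = j + ((cs.drop j).takeWhile (fun c => c.isAlpha)).length := by
  fun_induction pvTakeA cs cs.length j with
  | case1 j h ih =>
      obtain ⟨hlt, hl⟩ := h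
      rw [List.getD_eq_getElem cs ' ' hlt, esLetra_eq] at hl
      rw [List.drop_eq_getElem_cons hlt, List.takeWhile_cons, if_pos hl]
      simp only [List.length_cons] at *
      omega
  | case2 j h =>
      rcases Nat.lt_or_ge j cs.length with hlt | hge
      · have hl : esLetra (cs.getD j ' ') = false := by
          by_contra hc
          exact h ⟨hlt, by simpa using hc⟩
        rw [List.getD_eq_getElem cs ' ' hlt, esLetra_eq] at hl
        rw [List.drop_eq_getElem_cons hlt, List.takeWhile_cons, if_neg (by simp [hl])]
        simp
      · rw [List.drop_eq_nil_iff.mpr hge]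
        simp

theorem pvRuns_dropNonAlpha (s : List Char) :
    pvRuns [] s = pvRuns [] (s.dropWhile (fun c => !c.isAlpha)) := by
  induction s with
  | nil => rfl
  | cons c t ih =>
      rw [List.dropWhile_cons]
      by_cases hc : c.isAlpha
      · rw [if_neg (by simp [hc])]
      · rw [if_pos (by simp [hc]), ← ih]
        simp [pvRuns, hc]

theorem pvRuns_letter (s : List Char) : ∀ cur : List Char, cur ≠ [] →
    pvRuns cur s = (cur ++ s.takeWhile (fun c => c.isAlpha)) ::
      pvRuns [] (s.dropWhile (fun c => c.isAlpha)) := by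
  induction s with
  | nil => intro cur hc; simp [pvRuns, hc]
  | cons c t ih =>
      intro cur hc
      rw [List.takeWhile_cons, List.dropWhile_cons]
      by_cases hca : c.isAlpha
      · simp only [pvRuns, if_pos hca, hca]
        rw [ih (cur ++ [c]) (by simp)]
        simp
      · have h1 : pvRuns cur (c :: t) = cur :: pvRuns [] t := by
          simp only [pvRuns]
          rw [if_neg hca, if_pos hc]
        have h2 : pvRuns [] (c :: t) = pvRuns [] t := by
          simp only [pvRuns]
          rw [if_neg hca]
          simp
        rw [if_neg hca, if_neg hca, h1, h2]
        simp

theorem pvRuns_mem (s : List Char) : ∀ cur w : List Char,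
    (∀ c ∈ cur, c.isAlpha = true) → w ∈ pvRuns cur s →
    w ≠ [] ∧ ∀ c ∈ w, c.isAlpha = true := by
  induction s with
  | nil =>
      intro cur w hcur hw
      simp only [pvRuns] at hw
      split at hw
      · simp only [List.mem_singleton] at hw
        subst hw
        exact ⟨‹_›, hcur⟩
      · simp at hw
  | cons c t ih =>
      intro cur w hcur hw
      simp only [pvRuns] at hw
      split at hw
      · refine ih _ w ?_ hw
        intro x hx
        rcases List.mem_append.mp hx with h | h
        · exact hcur x h
        · simpa [List.mem_singleton.mp h] using ‹_›
      · split at hw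
        · rcases List.mem_cons.mp hw with h | h
          · subst h; exact ⟨‹_›, hcur⟩
          · exact ih [] w (by simp) h
        · exact ih [] w (by simp) hw

theorem pvRuns_ne_space {s w : List Char} (h : w ∈ pvRuns [] s) : w ≠ [' '] := by
  obtain ⟨hne, hall⟩ := pvRuns_mem s [] w (by simp) h
  intro hw
  subst hw
  simpa using hall ' ' (by simp)

theorem pvFoldB_eq (s : List Char) : ∀ (ws : List (List Char)) (cur : List Char),
    (if (s.foldl pvStepB (ws, cur)).2 ≠ [] then
        (s.foldl pvStepB (ws, cur)).1 ++ [(s.foldl pvStepB (ws, cur)).2]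
      else (s.foldl pvStepB (ws, cur)).1) = ws ++ pvRuns cur s := by
  induction s with
  | nil =>
      intro ws cur
      simp only [List.foldl_nil, pvRuns]
      split <;> simp_all
  | cons c t ih =>
      intro ws cur
      simp only [List.foldl_cons, pvStepB, pvRuns]
      by_cases hc : c.isAlpha
      · rw [if_pos hc, if_pos hc]
        exact ih ws (cur ++ [c])
      · rw [if_neg hc, if_neg hc]
        by_cases hcur : cur ≠ []
        · rw [if_pos hcur, if_pos hcur]
          rw [ih (ws ++ [cur]) []]
          simp
        · rw [if_neg hcur, if_neg hcur]
          push_neg at hcur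
          subst hcur
          exact ih ws []

theorem pvUpd_space (w : List Char) : pvUpd [' '] w = w := by simp [pvUpd]

theorem pvUpd_nil {M : List Char} (h : M ≠ [' ']) : pvUpd M [] = M := by
  simp [pvUpd, h]

theorem pvUpd_ne {M w : List Char} (hw : w ≠ [' ']) (hM : M ≠ [' ']) : pvUpd M w ≠ [' '] := by
  simp only [pvUpd, if_pos hM]
  split <;> assumption

theorem pvFold_upd_eq (l : List (List Char)) : ∀ M : List Char, M ≠ [' '] →
    (∀ x ∈ l, x ≠ [' ']) →
    l.foldl pvUpd M = l.foldl (fun best x => if best.length < x.length then x else best) M := by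
  induction l with
  | nil => intro M _ _; rfl
  | cons w t ih =>
      intro M hM hl
      have hw : w ≠ [' '] := hl w (by simp)
      have hupd : pvUpd M w = if M.length < w.length then w else M := by simp [pvUpd, hM]
      simp only [List.foldl_cons]
      rw [← hupd]
      exact ih _ (pvUpd_ne hw hM) (fun x hx => hl x (by simp [hx]))

theorem pvLoopA_stop (cs : List Char) (LT i : Nat) (M : List Char) (h : ¬ i < LT) :
    pvLoopA cs LT i M = M := by
  rw [pvLoopA, if_neg h]

theorem pvLoopA_step (cs : List Char) (LT i : Nat) (M : List Char) (h : i < LT) :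
    pvLoopA cs LT i M =
      pvLoopA cs LT (pvTakeA cs LT (pvSkipA cs LT i))
        (if pvTakeA cs LT (pvSkipA cs LT i) ≤ LT then
          pvUpd M ((cs.drop (pvSkipA cs LT i)).take (pvTakeA cs LT (pvSkipA cs LT i) - pvSkipA cs LT i))
         else M) := by
  rw [pvLoopA, if_pos h]
  rfl

theorem pvLoopA_eq (cs : List Char) : ∀ (n i : Nat) (M : List Char), cs.length - i ≤ n →
    pvLoopA cs cs.length i M =
      if i < cs.length ∧ pvRuns [] (cs.drop i) = [] then pvUpd M []
      else (pvRuns [] (cs.drop i)).foldl pvUpd M := by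
  intro n
  induction n with
  | zero =>
      intro i M hn
      have hge : cs.length ≤ i := by omega
      rw [pvLoopA_stop cs cs.length i M (by omega), List.drop_eq_nil_iff.mpr hge]
      rw [if_neg (by intro hh; omega)]
      simp [pvRuns]
  | succ n ih =>
      intro i M hn
      by_cases hi : i < cs.length
      · set i1 := pvSkipA cs cs.length i with hi1def
        set j1 := pvTakeA cs cs.length i1 with hj1def
        have hskip : i1 = i + ((cs.drop i).takeWhile (fun c => !c.isAlpha)).length :=
          pvSkipA_eq cs i
        have htake : j1 = i1 + ((cs.drop i1).takeWhile (fun c => c.isAlpha)).length :=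
          pvTakeA_eq cs i1
        have hlen1 : ((cs.drop i).takeWhile (fun c => !c.isAlpha)).length ≤ cs.length - i := by
          have h1 := (List.takeWhile_prefix (l := cs.drop i) (fun c => !c.isAlpha)).length_le
          simpa using h1
        have hlen2 : ((cs.drop i1).takeWhile (fun c => c.isAlpha)).length ≤ cs.length - i1 := by
          have h1 := (List.takeWhile_prefix (l := cs.drop i1) (fun c => c.isAlpha)).length_le
          simpa using h1
        have hi1le : i1 ≤ cs.length := by omega
        have hj1le : j1 ≤ cs.length := by omega
        have hdropi1 : cs.drop i1 = (cs.drop i).dropWhile (fun c => !c.isAlpha) := by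
          rw [hskip, ← drop_len_takeWhile (fun c => !c.isAlpha) (cs.drop i), List.drop_drop]
        have hdropj1 : cs.drop j1 = (cs.drop i1).dropWhile (fun c => c.isAlpha) := by
          rw [htake, ← drop_len_takeWhile (fun c => c.isAlpha) (cs.drop i1), List.drop_drop]
        have hwtake : (cs.drop i1).take (j1 - i1) = (cs.drop i1).takeWhile (fun c => c.isAlpha) := by
          rw [show j1 - i1 = ((cs.drop i1).takeWhile (fun c => c.isAlpha)).length from by omega]
          exact take_len_takeWhile _ _
        rw [pvLoopA_step cs cs.length i M hi, ← hi1def, ← hj1def, if_pos hj1le, hwtake]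
        by_cases hnil : cs.drop i1 = []
        · have hii : cs.length ≤ i1 := List.drop_eq_nil_iff.mp hnil
          have hj1i1 : j1 = i1 := by rw [htake, hnil]; simp
          have hrnil : pvRuns [] (cs.drop i) = [] := by
            rw [pvRuns_dropNonAlpha, ← hdropi1, hnil]
            simp [pvRuns]
          rw [pvLoopA_stop cs cs.length j1 _ (by omega), if_pos ⟨hi, hrnil⟩, hnil]
          simp
        · obtain ⟨c, t, hni⟩ : ∃ c t, cs.drop i1 = c :: t := by
            cases h' : cs.drop i1 with
            | nil => exact absurd h' hnil
            | cons a b => exact ⟨a, b, rfl⟩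
          have hca : c.isAlpha = true := by
            have h1 : (cs.drop i).dropWhile (fun c => !c.isAlpha) = c :: t := by
              rw [← hdropi1, hni]
            have h2 := dropWhile_head_false h1
            simpa using h2
          have hrun : pvRuns [] (cs.drop i) =
              ((cs.drop i1).takeWhile (fun c => c.isAlpha)) :: pvRuns [] (cs.drop j1) := by
            rw [pvRuns_dropNonAlpha, ← hdropi1, hdropj1, hni]
            have h1 : pvRuns ([] : List Char) (c :: t) = pvRuns [c] t := by
              simp [pvRuns, hca]
            rw [h1, pvRuns_letter t [c] (by simp), List.takeWhile_cons, if_pos hca,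
              List.dropWhile_cons, if_pos hca]
            simp
          set w := (cs.drop i1).takeWhile (fun c => c.isAlpha) with hwdef
          have hwne : w ≠ [' '] := pvRuns_ne_space (s := cs.drop i) (by rw [hrun]; simp)
          have hMne : pvUpd M w ≠ [' '] := by
            by_cases hM : M = [' ']
            · rw [hM, pvUpd_space]; exact hwne
            · exact pvUpd_ne hwne hM
          have hstep : i < j1 := pvStep_gt cs cs.length i hi
          rw [ih j1 (pvUpd M w) (by omega)]
          conv_rhs =>
            rw [if_neg (show ¬(i < cs.length ∧ pvRuns [] (List.drop i cs) = []) from by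
                rw [hrun]; rintro ⟨-, hh⟩; exact List.cons_ne_nil _ _ hh),
              hrun, List.foldl_cons]
          split
          · rename_i hh
            rw [hh.2, List.foldl_nil, pvUpd_nil hMne]
          · rfl
      · have hge : cs.length ≤ i := by omega
        rw [pvLoopA_stop cs cs.length i M hi, List.drop_eq_nil_iff.mpr hge]
        rw [if_neg (by intro hh; omega)]
        simp [pvRuns]

theorem pvAlt_eq (txt : String) : PMaxLong_alt txt =
    (match pvRuns [] txt.toList with
    | [] => ""
    | w :: rest =>
        String.ofList (rest.foldl (fun best x => if best.length < x.length then x else best) w)) := by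
  have hB := pvFoldB_eq txt.toList [] []
  simp only [List.nil_append] at hB
  simp only [PMaxLong_alt]
  rw [hB]

theorem pvA_eq_empty : PMaxLong "" = " " := by
  have h0 : ("" : String).toList = [] := by decide
  unfold PMaxLong
  rw [h0]
  rw [pvLoopA_stop _ _ _ _ (by simp)]

theorem pvB_eq_empty : PMaxLong_alt "" = "" := by decide

theorem PMaxLong_spec : Claim_unchanged_PMaxLong := by
  intro txt _ hD
  have hne : txt ≠ "" := hD
  have hcs : txt.toList ≠ [] := fun h => hne (String.toList_eq_nil_iff.mp h)
  have hlen : 0 < txt.toList.length := List.length_pos_of_ne_nil hcs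
  show PMaxLong txt = PMaxLong_alt txt
  rw [pvAlt_eq]
  unfold PMaxLong
  rw [pvLoopA_eq txt.toList txt.toList.length 0 [' '] (by omega)]
  simp only [List.drop_zero]
  cases hr : pvRuns [] txt.toList with
  | nil =>
      rw [if_pos ⟨hlen, rfl⟩]
      simp [pvUpd]
  | cons w rest =>
      have hwne : w ≠ [' '] := pvRuns_ne_space (s := txt.toList) (by rw [hr]; simp)
      rw [if_neg (by simp), List.foldl_cons, pvUpd_space,
        pvFold_upd_eq rest w hwne
          (fun x hx => pvRuns_ne_space (s := txt.toList) (by rw [hr]; simp [hx]))]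

theorem PMaxLong_changed : Claim_changed_PMaxLong := by
  unfold Claim_changed_PMaxLong pvDiffWitness_PMaxLong pvDiffWitnessOut_PMaxLong
  exact ⟨by decide, rfl, pvA_eq_empty, pvB_eq_empty, by decide⟩

theorem PMaxLong_tight : Claim_exact_PMaxLong := by
  intro txt _ hD
  have h : txt = "" := hD
  subst h
  rw [pvA_eq_empty, pvB_eq_empty]
  decide
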